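-- pv_equiv track=rewrite | github.com/SWeszler/programming_problems | lists/flight_bookings/flight_bookings.py | flight_bookings
-- ===== SOURCE A (Python) =====
-- def flight_bookings(bookings, n):
--     flights = [0] * n
--
--     for booking in bookings:
--         flights[booking[0] - 1] += booking[2]
--         if booking[1] < n:
--             flights[booking[1]] -= booking[2]
--
--     s = 0
--     for i in range(len(flights)):
--         flights[i] += s
--         s = flights[i]
--
--     return flights
-- ===== SOURCE B (Python) =====
-- def flight_bookings(bookings, n):
--     flights = [0] * n
--     for booking in bookings:
--         flights[booking[0] - 1:] = [x + booking[2] for x in flights[booking[0] - 1:]]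
--         flights[booking[1]:] = [x - booking[2] for x in flights[booking[1]:]]
--     return flights
-- ===== Notes on version B (the rewrite author's own statement) =====
-- stated objective: alternative
-- what changed: Replaces the difference-array boundary marks and the separate prefix-sum integration pass with direct bulk slice updates: each booking adds its seats to the whole suffix from its start and removes them from the suffix past its end, so no second pass exists; Pre_ excludes only inputs on which A raises IndexError (a booking with fewer than three fields or a boundary index outside the list's accepted range).
import Mathlib
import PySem

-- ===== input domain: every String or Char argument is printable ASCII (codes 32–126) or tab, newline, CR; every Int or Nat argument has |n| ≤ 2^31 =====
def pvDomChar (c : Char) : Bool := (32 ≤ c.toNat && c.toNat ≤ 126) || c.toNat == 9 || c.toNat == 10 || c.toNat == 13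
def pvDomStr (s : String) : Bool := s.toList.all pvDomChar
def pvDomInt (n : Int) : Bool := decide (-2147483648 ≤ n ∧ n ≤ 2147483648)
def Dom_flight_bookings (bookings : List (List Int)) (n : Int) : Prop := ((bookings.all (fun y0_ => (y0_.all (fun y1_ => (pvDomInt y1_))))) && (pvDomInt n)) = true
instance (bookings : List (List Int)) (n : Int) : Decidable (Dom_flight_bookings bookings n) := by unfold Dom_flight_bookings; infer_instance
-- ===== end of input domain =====

-- B replaces A's difference-array boundary marks + prefix-sum integration pass with direct
-- bulk slice updates per booking (an alternative formulation; same return value, no second pass).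


-- ===== PORT A =====
-- Python's `xs[i] += c`
def pyAddAt (fl : List Int) (i c : Int) : List Int :=
  PySem.List.pySetD fl i (PySem.List.pyGetD fl i 0 + c)

-- first pass: mark boundaries in a difference array
def pvStepA (n : Int) (fl : List Int) (booking : List Int) : List Int :=
  let fl1 := pyAddAt fl (PySem.List.pyGetD booking 0 0 - 1) (PySem.List.pyGetD booking 2 0)
  if PySem.List.pyGetD booking 1 0 < n then
    pyAddAt fl1 (PySem.List.pyGetD booking 1 0) (-(PySem.List.pyGetD booking 2 0))
  else fl1

-- second pass: `for i in range(len(flights)): flights[i] += s; s = flights[i]`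
def pvScanA : Int → List Int → List Int
  | _, [] => []
  | s, x :: xs => (x + s) :: pvScanA (x + s) xs

def flight_bookings (bookings : List (List Int)) (n : Int) : List Int :=
  pvScanA 0 (bookings.foldl (pvStepA n) (List.replicate n.toNat 0))

-- ===== PORT B =====
-- `flights[a:] = [f(x) for x in flights[a:]]`: keep flights[:a], append the mapped suffix
def pySuffixAssign (fl : List Int) (a : Int) (f : Int → Int) : List Int :=
  PySem.List.slice fl none (some a) ++ (PySem.List.slice fl (some a) none).map f

def pvStepB (fl : List Int) (booking : List Int) : List Int :=
  let fl1 := pySuffixAssign fl (PySem.List.pyGetD booking 0 0 - 1)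
    (fun x => x + PySem.List.pyGetD booking 2 0)
  pySuffixAssign fl1 (PySem.List.pyGetD booking 1 0)
    (fun x => x - PySem.List.pyGetD booking 2 0)

def flight_bookings_alt (bookings : List (List Int)) (n : Int) : List Int :=
  bookings.foldl pvStepB (List.replicate n.toNat 0)

-- ===== PRECONDITION & SPEC =====
-- Pre_ excludes exactly the inputs on which A raises IndexError: a booking with fewer than
-- three fields, or a boundary index outside Python's accepted range for the list.
def Pre_flight_bookings (bookings : List (List Int)) (n : Int) : Prop :=
  ∀ b ∈ bookings, 3 ≤ b.length ∧ -((n.toNat : Int)) ≤ b.getD 0 0 - 1 ∧ b.getD 0 0 - 1 < (n.toNat : Int) ∧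
    (b.getD 1 0 < n → -((n.toNat : Int)) ≤ b.getD 1 0)
instance (bookings : List (List Int)) (n : Int) : Decidable (Pre_flight_bookings bookings n) := by
  unfold Pre_flight_bookings; infer_instance

def pvWitness_flight_bookings : List (List Int) × Int := ([[1, 2, 3], [2, 3, 1]], 3)

def Spec_flight_bookings (bookings : List (List Int)) (n : Int) (out : List Int) : Prop := out = flight_bookings_alt bookings n
instance (bookings : List (List Int)) (n : Int) (out : List Int) : Decidable (Spec_flight_bookings bookings n out) := by unfold Spec_flight_bookings; infer_instance

-- ===== CLAIM =====
def Claim_equal_flight_bookings : Prop := ∀ (bookings : List (List Int)) (n : Int), Dom_flight_bookings bookings n → Pre_flight_bookings bookings n → Spec_flight_bookings bookings n (flight_bookings bookings n)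

-- ===== LEMMAS AND PROOFS =====

-- Python's normalisation of an in-range (possibly negative) index
def pyNatIdx (len : Nat) (i : Int) : Nat :=
  if 0 ≤ i then i.toNat else len - (-i).toNat

-- per-booking contribution to position j, the shared characterisation of both ports
def ctb (n : Int) (j : ℕ) (b : List Int) : Int :=
  (if pyNatIdx n.toNat (b.getD 0 0 - 1) ≤ j then b.getD 2 0 else 0)
    - (if b.getD 1 0 < n ∧ pyNatIdx n.toNat (b.getD 1 0) ≤ j then b.getD 2 0 else 0)

lemma pyIdx?_in (len : Nat) (i : Int) (h1 : -(len : Int) ≤ i) (h2 : i < (len : Int)) :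
    PySem.List.pyIdx? len i = some (pyNatIdx len i) := by
  unfold PySem.List.pyIdx? pyNatIdx
  split_ifs <;> simp_all

lemma pyNatIdx_lt (len : Nat) (i : Int) (_h1 : -(len : Int) ≤ i) (h2 : i < (len : Int))
    (hL : 0 < len) : pyNatIdx len i < len := by
  unfold pyNatIdx; split_ifs <;> omega

lemma pyAddAt_wrap (fl : List Int) (i c : Int) (h1 : -(fl.length : Int) ≤ i)
    (h2 : i < (fl.length : Int)) :
    pyAddAt fl i c
      = fl.set (pyNatIdx fl.length i) (fl.getD (pyNatIdx fl.length i) 0 + c) := by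
  unfold pyAddAt PySem.List.pySetD PySem.List.pySet? PySem.List.pyGetD PySem.List.pyGet?
  rw [pyIdx?_in fl.length i h1 h2]
  simp [List.getD_eq_getElem?_getD]

lemma pyGetD_numeral (b : List Int) (k : ℕ) : PySem.List.pyGetD b (k : Int) 0 = b.getD k 0 := by
  simp

lemma sum_take_set (fl : List Int) (k : ℕ) (c : Int) (m : ℕ) (hk : k < fl.length) :
    ((fl.set k (fl.getD k 0 + c)).take m).sum = (fl.take m).sum + (if k < m then c else 0) := by
  induction fl generalizing k m with
  | nil => simp at hk
  | cons x xs ih =>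
    cases k with
    | zero =>
      cases m with
      | zero => simp
      | succ m => simp [List.take_succ_cons]; ring
    | succ k =>
      cases m with
      | zero => simp
      | succ m =>
        simp only [List.getD_cons_succ, List.set_cons_succ, List.take_succ_cons, List.sum_cons]
        rw [ih k m (by simpa using hk)]
        simp only [Nat.succ_lt_succ_iff]
        ring

lemma pvScanA_length (s : Int) (fl : List Int) : (pvScanA s fl).length = fl.length := by
  induction fl generalizing s with
  | nil => simp [pvScanA]
  | cons x xs ih => simp [pvScanA, ih]

lemma pvScanA_getD (s : Int) (fl : List Int) (j : ℕ) (h : j < fl.length) :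
    (pvScanA s fl).getD j 0 = s + (fl.take (j + 1)).sum := by
  induction fl generalizing s j with
  | nil => simp at h
  | cons x xs ih =>
    cases j with
    | zero => simp [pvScanA]; ring
    | succ j =>
      simp only [pvScanA, List.getD_cons_succ, List.take_succ_cons, List.sum_cons]
      rw [ih (x + s) j (by simpa using h)]
      ring

lemma pyAddAt_length (fl : List Int) (i c : Int) : (pyAddAt fl i c).length = fl.length := by
  simp [pyAddAt, PySem.List.length_pySetD]

lemma pvStepA_length (n : Int) (fl b : List Int) : (pvStepA n fl b).length = fl.length := by
  unfold pvStepA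
  split <;> simp [pyAddAt_length]

lemma foldA_length (n : Int) : ∀ (bs : List (List Int)) (fl : List Int),
    (bs.foldl (pvStepA n) fl).length = fl.length := by
  intro bs
  induction bs with
  | nil => intro fl; simp
  | cons b bs ih => intro fl; simp only [List.foldl_cons]; rw [ih, pvStepA_length]

-- one booking, A side: the change of the prefix sum at position j is exactly ctb
lemma stepA_sum (n : Int) (b fl : List Int)
    (hb : 3 ≤ b.length ∧ -((n.toNat : Int)) ≤ b.getD 0 0 - 1 ∧ b.getD 0 0 - 1 < (n.toNat : Int) ∧
      (b.getD 1 0 < n → -((n.toNat : Int)) ≤ b.getD 1 0))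
    (hfl : fl.length = n.toNat) (j : ℕ) (hj : j < n.toNat) :
    ((pvStepA n fl b).take (j + 1)).sum = (fl.take (j + 1)).sum + ctb n j b := by
  obtain ⟨hlen, h1a, h1b, h2i⟩ := hb
  obtain ⟨s, hs⟩ : ∃ x, b.getD 0 0 = x := ⟨_, rfl⟩
  obtain ⟨e, he⟩ : ∃ x, b.getD 1 0 = x := ⟨_, rfl⟩
  obtain ⟨c, hc⟩ : ∃ x, b.getD 2 0 = x := ⟨_, rfl⟩
  rw [hs] at h1a h1b
  rw [he] at h2i
  have h0' : PySem.List.pyGetD b (0 : Int) 0 = s := by rw [← hs]; exact pyGetD_numeral b 0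
  have h1' : PySem.List.pyGetD b (1 : Int) 0 = e := by rw [← he]; exact pyGetD_numeral b 1
  have h2' : PySem.List.pyGetD b (2 : Int) 0 = c := by rw [← hc]; exact pyGetD_numeral b 2
  have hL : 0 < n.toNat := by omega
  have hw1 := pyAddAt_wrap fl (s - 1) c (by omega) (by omega)
  have hk1 : pyNatIdx fl.length (s - 1) < fl.length := pyNatIdx_lt _ _ (by omega) (by omega) (by omega)
  simp only [pvStepA, ctb, hs, he, hc, h0', h1', h2']
  rw [hw1]
  by_cases hen : e < n
  · rw [if_pos hen]
    have hee : -((n.toNat : Int)) ≤ e := h2i hen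
    rw [pyAddAt_wrap _ e (-c) (by simp only [List.length_set]; omega)
      (by simp only [List.length_set]; omega)]
    simp only [List.length_set]
    have hk2 : pyNatIdx fl.length e < fl.length :=
      pyNatIdx_lt _ _ (by omega) (by omega) (by omega)
    rw [sum_take_set _ _ _ _ (by simp only [List.length_set]; exact hk2)]
    rw [sum_take_set _ _ _ _ hk1]
    simp only [hfl]
    split_ifs <;> omega
  · rw [if_neg hen]
    rw [sum_take_set _ _ _ _ hk1]
    simp only [hfl]
    have hf : ¬(e < n ∧ pyNatIdx n.toNat e ≤ j) := fun h => hen h.1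
    rw [if_neg hf]
    split_ifs <;> omega

lemma foldA_sum (n : Int) : ∀ (bs : List (List Int)) (fl : List Int),
    (∀ b ∈ bs, 3 ≤ b.length ∧ -((n.toNat : Int)) ≤ b.getD 0 0 - 1 ∧ b.getD 0 0 - 1 < (n.toNat : Int) ∧
      (b.getD 1 0 < n → -((n.toNat : Int)) ≤ b.getD 1 0)) →
    fl.length = n.toNat → ∀ j : ℕ, j < n.toNat →
    ((bs.foldl (pvStepA n) fl).take (j + 1)).sum
      = (fl.take (j + 1)).sum + (bs.map (ctb n j)).sum := by
  intro bs
  induction bs with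
  | nil => intro fl _ _ j _; simp
  | cons b bs ih =>
    intro fl hpre hfl j hj
    simp only [List.foldl_cons, List.map_cons, List.sum_cons]
    rw [ih (pvStepA n fl b) (fun x hx => hpre x (List.mem_cons_of_mem _ hx))
      (by rw [pvStepA_length]; exact hfl) j hj]
    rw [stepA_sum n b fl (hpre b List.mem_cons_self) hfl j hj]
    ring

-- B side: a slice assignment is take-and-mapped-drop at the clamped index
lemma slice_none_some (xs : List Int) (a : Int) :
    PySem.List.slice xs none (some a) = xs.take (PySem.List.clampIdx xs.length a) := by
  simp [PySem.List.slice, PySem.List.clampIdx]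

lemma pySuffixAssign_eq (fl : List Int) (a : Int) (f : Int → Int) :
    pySuffixAssign fl a f
      = fl.take (PySem.List.clampIdx fl.length a)
        ++ (fl.drop (PySem.List.clampIdx fl.length a)).map f := by
  unfold pySuffixAssign
  rw [slice_none_some, PySem.List.slice_some_none]

lemma clampIdx_in (len : ℕ) (i : Int) (h1 : -(len : Int) ≤ i) (h2 : i < (len : Int)) :
    PySem.List.clampIdx len i = pyNatIdx len i := by
  unfold PySem.List.clampIdx pyNatIdx
  split_ifs <;> omega

lemma clampIdx_ge (len : ℕ) (e : Int) (h : (len : Int) ≤ e) : PySem.List.clampIdx len e = len := by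
  unfold PySem.List.clampIdx
  split_ifs <;> omega

lemma suffix_map_length (fl : List Int) (w : ℕ) (f : Int → Int) (hw : w ≤ fl.length) :
    (fl.take w ++ (fl.drop w).map f).length = fl.length := by
  simp
  omega

lemma suffix_map_getD (fl : List Int) (w : ℕ) (f : Int → Int) (hw : w ≤ fl.length) (j : ℕ)
    (hj : j < fl.length) :
    (fl.take w ++ (fl.drop w).map f).getD j 0
      = if w ≤ j then f (fl.getD j 0) else fl.getD j 0 := by
  rw [List.getD_eq_getElem _ _ (by rw [suffix_map_length fl w f hw]; exact hj)]
  by_cases hjw : j < w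
  · rw [List.getElem_append_left (by simp; omega)]
    rw [if_neg (by omega)]
    rw [List.getElem_take, List.getD_eq_getElem _ _ hj]
  · rw [List.getElem_append_right (by simp; omega)]
    rw [if_pos (by omega)]
    rw [List.getElem_map, List.getElem_drop]
    have hix : w + (j - (fl.take w).length) = j := by simp; omega
    simp only [hix]
    rw [List.getD_eq_getElem _ _ hj]

lemma stepB_length (b fl : List Int) : (pvStepB fl b).length = fl.length := by
  unfold pvStepB
  rw [pySuffixAssign_eq, pySuffixAssign_eq]
  rw [suffix_map_length _ _ _ (by unfold PySem.List.clampIdx; split_ifs <;> omega)]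
  rw [suffix_map_length _ _ _ (by unfold PySem.List.clampIdx; split_ifs <;> omega)]

lemma stepB_getD (n : Int) (b fl : List Int)
    (hb : 3 ≤ b.length ∧ -((n.toNat : Int)) ≤ b.getD 0 0 - 1 ∧ b.getD 0 0 - 1 < (n.toNat : Int) ∧
      (b.getD 1 0 < n → -((n.toNat : Int)) ≤ b.getD 1 0))
    (hfl : fl.length = n.toNat) (j : ℕ) (hj : j < n.toNat) :
    (pvStepB fl b).getD j 0 = fl.getD j 0 + ctb n j b := by
  obtain ⟨hlen, h1a, h1b, h2i⟩ := hb
  obtain ⟨s, hs⟩ : ∃ x, b.getD 0 0 = x := ⟨_, rfl⟩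
  obtain ⟨e, he⟩ : ∃ x, b.getD 1 0 = x := ⟨_, rfl⟩
  obtain ⟨c, hc⟩ : ∃ x, b.getD 2 0 = x := ⟨_, rfl⟩
  rw [hs] at h1a h1b
  rw [he] at h2i
  have h0' : PySem.List.pyGetD b (0 : Int) 0 = s := by rw [← hs]; exact pyGetD_numeral b 0
  have h1' : PySem.List.pyGetD b (1 : Int) 0 = e := by rw [← he]; exact pyGetD_numeral b 1
  have h2' : PySem.List.pyGetD b (2 : Int) 0 = c := by rw [← hc]; exact pyGetD_numeral b 2
  simp only [pvStepB, ctb, hs, he, hc, h0', h1', h2']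
  rw [pySuffixAssign_eq, pySuffixAssign_eq]
  have hc1 : PySem.List.clampIdx fl.length (s - 1) = pyNatIdx n.toNat (s - 1) := by
    rw [hfl]; exact clampIdx_in _ _ (by omega) (by omega)
  have hw1lt : pyNatIdx n.toNat (s - 1) < n.toNat :=
    pyNatIdx_lt _ _ (by omega) (by omega) (by omega)
  have hw1 : pyNatIdx n.toNat (s - 1) ≤ fl.length := by omega
  rw [hc1]
  have hL1 := suffix_map_length fl (pyNatIdx n.toNat (s - 1)) (fun x => x + c) hw1
  by_cases hen : e < n
  · have hee : -((n.toNat : Int)) ≤ e := h2i hen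
    have hw2lt : pyNatIdx n.toNat e < n.toNat :=
      pyNatIdx_lt _ _ (by omega) (by omega) (by omega)
    have hc2 : PySem.List.clampIdx (fl.take (pyNatIdx n.toNat (s - 1))
        ++ (fl.drop (pyNatIdx n.toNat (s - 1))).map (fun x => x + c)).length e
        = pyNatIdx n.toNat e := by
      rw [hL1, hfl]; exact clampIdx_in _ _ (by omega) (by omega)
    rw [hc2]
    rw [suffix_map_getD _ _ _ (by omega) j (by omega)]
    rw [suffix_map_getD fl _ _ hw1 j (by omega)]
    have ht : (e < n ∧ pyNatIdx n.toNat e ≤ j) = (pyNatIdx n.toNat e ≤ j) := by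
      simp [hen]
    simp only [ht]
    split_ifs <;> ring
  · have hc2 : PySem.List.clampIdx (fl.take (pyNatIdx n.toNat (s - 1))
        ++ (fl.drop (pyNatIdx n.toNat (s - 1))).map (fun x => x + c)).length e
        = fl.length := by
      rw [hL1]; exact clampIdx_ge _ _ (by omega)
    rw [hc2]
    rw [suffix_map_getD _ _ _ (by omega) j (by omega)]
    rw [if_neg (by omega)]
    rw [suffix_map_getD fl _ _ hw1 j (by omega)]
    have hf : ¬(e < n ∧ pyNatIdx n.toNat e ≤ j) := fun h => hen h.1
    rw [if_neg hf]
    split_ifs <;> ring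

lemma foldB_length : ∀ (bs : List (List Int)) (fl : List Int),
    (bs.foldl pvStepB fl).length = fl.length := by
  intro bs
  induction bs with
  | nil => intro fl; simp
  | cons b bs ih => intro fl; simp only [List.foldl_cons]; rw [ih, stepB_length]

lemma foldB_getD (n : Int) : ∀ (bs : List (List Int)) (fl : List Int),
    (∀ b ∈ bs, 3 ≤ b.length ∧ -((n.toNat : Int)) ≤ b.getD 0 0 - 1 ∧ b.getD 0 0 - 1 < (n.toNat : Int) ∧
      (b.getD 1 0 < n → -((n.toNat : Int)) ≤ b.getD 1 0)) →
    fl.length = n.toNat → ∀ j : ℕ, j < n.toNat →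
    (bs.foldl pvStepB fl).getD j 0 = fl.getD j 0 + (bs.map (ctb n j)).sum := by
  intro bs
  induction bs with
  | nil => intro fl _ _ j _; simp
  | cons b bs ih =>
    intro fl hpre hfl j hj
    simp only [List.foldl_cons, List.map_cons, List.sum_cons]
    rw [ih (pvStepB fl b) (fun x hx => hpre x (List.mem_cons_of_mem _ hx))
      (by rw [stepB_length]; exact hfl) j hj]
    rw [stepB_getD n b fl (hpre b List.mem_cons_self) hfl j hj]
    ring

-- ===== VERDICT =====
theorem flight_bookings_spec : Claim_equal_flight_bookings := by
  intro bookings n _ hpre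
  unfold Spec_flight_bookings flight_bookings flight_bookings_alt
  have hlA : (bookings.foldl (pvStepA n) (List.replicate n.toNat 0)).length = n.toNat := by
    rw [foldA_length]; simp
  have hlB : (bookings.foldl pvStepB (List.replicate n.toNat 0)).length = n.toNat := by
    rw [foldB_length]; simp
  apply List.ext_getElem
  · rw [pvScanA_length, hlA, hlB]
  · intro j hj1 hj2
    have hjn : j < n.toNat := by rw [pvScanA_length, hlA] at hj1; exact hj1
    rw [← List.getD_eq_getElem _ 0 hj1, ← List.getD_eq_getElem _ 0 hj2]
    rw [pvScanA_getD 0 _ j (by rw [hlA]; exact hjn)]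
    rw [foldA_sum n bookings (List.replicate n.toNat 0) hpre (by simp) j hjn]
    rw [foldB_getD n bookings (List.replicate n.toNat 0) hpre (by simp) j hjn]
    simp [List.take_replicate]
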